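-- pv_equiv track=rewrite | github.com/facebookresearch/ParlAI | parlai/tasks/multiwoz_checkdst/utils.py | extract_slot_from_string
-- ===== SOURCE A (Python) =====
-- DOMAINS = [
--     "attraction",
--     "hotel",
--     "hospital",
--     "restaurant",
--     "police",
--     "taxi",
--     "train",
-- ]
--
-- NAMED_ENTITY_SLOTS = {
--     "attraction--name",
--     "restaurant--name",
--     "hotel--name",
--     "bus--departure",
--     "bus--destination",
--     "taxi--departure",
--     "taxi--destination",
--     "train--departure",
--     "train--destination",
-- }
--
-- NAMED_ENTITY_INTERESTED = {"restaurant--name", "hotel--name", "attraction--name"}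
--
-- def extract_slot_from_string(slots_string):
--     """
--     Either ground truth or generated result should be in the format:
--     "dom slot_type slot_val, dom slot_type slot_val, ..., dom slot_type slot_val,"
--     and this function would reformat the string into list:
--     ["dom--slot_type--slot_val", ... ]
--     """
--     slots_list = []
--
--     if slots_string is None:
--         return [], [], [], []
--
--     slot_val_conversion = {
--         "centre": "center",
--         "3-star": "3",
--         "2-star": "2",
--         "1-star": "1",
--         "0-star": "0",
--         "4-star": "4",
--         "5-star": "5",
--     }
--
--     per_domain_slot_lists = {}
--     named_entity_slot_lists = []
--     named_entity_slot_interested_lists = []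
--
--     # # # remove start and ending token if any
--     str_split = slots_string.strip().split()
--     if str_split != [] and str_split[0] in ["<bs>", "</bs>"]:
--         str_split = str_split[1:]
--     if "</bs>" in str_split:
--         str_split = str_split[: str_split.index("</bs>")]
--
--     str_split = " ".join(str_split).split(",")
--     if str_split[-1] == "":
--         str_split = str_split[:-1]
--     str_split = [slot.strip() for slot in str_split]
--
--     for slot_ in str_split:
--         slot = slot_.split()
--         if len(slot) > 2 and slot[0] in DOMAINS:
--             domain = slot[0]
--             if slot[1] == "book" and slot[2] in ["day", "time", "people", "stay"]:
--                 slot_type = slot[1] + " " + slot[2]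
--                 slot_val = " ".join(slot[3:])
--             else:
--                 slot_type = slot[1]
--                 slot_val = " ".join(slot[2:])
--             slot_val = slot_val_conversion.get(slot_val, slot_val)
--             # if not slot_val == "dontcare":
--
--             slots_list.append(domain + "--" + slot_type + "--" + slot_val)
--             if domain in per_domain_slot_lists:
--                 per_domain_slot_lists[domain].add(slot_type + "--" + slot_val)
--             else:
--                 per_domain_slot_lists[domain] = {slot_type + "--" + slot_val}
--             if domain + "--" + slot_type in NAMED_ENTITY_SLOTS:
--                 named_entity_slot_lists.append(
--                     domain + "--" + slot_type + "--" + slot_val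
--                 )
--             if domain + "--" + slot_type in NAMED_ENTITY_INTERESTED:
--                 named_entity_slot_interested_lists.append(
--                     domain + "--" + slot_type + "--" + slot_val
--                 )
--
--     return (
--         slots_list,
--         per_domain_slot_lists,
--         named_entity_slot_lists,
--         named_entity_slot_interested_lists,
--     )
-- ===== SOURCE B (Python) =====
-- DOMAINS = [
--     "attraction",
--     "hotel",
--     "hospital",
--     "restaurant",
--     "police",
--     "taxi",
--     "train",
-- ]
--
-- NAMED_ENTITY_SLOTS = {
--     "attraction--name",
--     "restaurant--name",
--     "hotel--name",
--     "bus--departure",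
--     "bus--destination",
--     "taxi--departure",
--     "taxi--destination",
--     "train--departure",
--     "train--destination",
-- }
--
-- NAMED_ENTITY_INTERESTED = {"restaurant--name", "hotel--name", "attraction--name"}
--
-- _SLOT_VAL_CONVERSION = {
--     "centre": "center",
--     "3-star": "3",
--     "2-star": "2",
--     "1-star": "1",
--     "0-star": "0",
--     "4-star": "4",
--     "5-star": "5",
-- }
--
-- _BOOK_SLOTS = ("day", "time", "people", "stay")
--
--
-- def extract_slot_from_string(slots_string):
--     """Token-level state machine: instead of re-joining the tokens into one big
--     string and re-splitting it on commas (and re-splitting every chunk on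
--     whitespace again), walk the token stream once, splitting each token at its
--     commas, and accumulate each comma-separated slot directly as its list of
--     words.  Empty segments are dropped on the fly (they are exactly what
--     strip()/split() would discard).  The trailing-empty-chunk trim of the
--     original corresponds to: the token stream is empty, or its last token ends
--     with a comma."""
--     if slots_string is None:
--         return [], [], [], []
--
--     toks = slots_string.split()
--     if toks and toks[0] in ("<bs>", "</bs>"):
--         toks = toks[1:]
--     if "</bs>" in toks:
--         toks = toks[: toks.index("</bs>")]
--
--     # comma segmentation of the token stream -> list of word-lists
--     parts = []
--     cur = []
--     for tok in toks:
--         segs = tok.split(",")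
--         if segs[0]:
--             cur.append(segs[0])
--         for seg in segs[1:]:
--             parts.append(cur)
--             cur = [seg] if seg else []
--     parts.append(cur)
--     if not toks or toks[-1].endswith(","):
--         parts.pop()
--
--     slots_list = []
--     per_domain_slot_lists = {}
--     named_entity_slot_lists = []
--     named_entity_slot_interested_lists = []
--
--     for words in parts:
--         if len(words) <= 2 or words[0] not in DOMAINS:
--             continue
--         domain = words[0]
--         if words[1] == "book" and words[2] in _BOOK_SLOTS:
--             slot_type = words[1] + " " + words[2]
--             rest = words[3:]
--         else:
--             slot_type = words[1]
--             rest = words[2:]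
--         slot_val = " ".join(rest)
--         slot_val = _SLOT_VAL_CONVERSION.get(slot_val, slot_val)
--         full = domain + "--" + slot_type + "--" + slot_val
--         slots_list.append(full)
--         per_domain_slot_lists.setdefault(domain, set()).add(slot_type + "--" + slot_val)
--         if domain + "--" + slot_type in NAMED_ENTITY_SLOTS:
--             named_entity_slot_lists.append(full)
--         if domain + "--" + slot_type in NAMED_ENTITY_INTERESTED:
--             named_entity_slot_interested_lists.append(full)
--
--     return (
--         slots_list,
--         per_domain_slot_lists,
--         named_entity_slot_lists,
--         named_entity_slot_interested_lists,
--     )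
-- ===== Notes on version B (the rewrite author's own statement) =====
-- stated objective: alternative
-- what changed: Replaces A's join-the-tokens-then-resplit-on-commas-then-strip-and-split-each-chunk pipeline by a single token-level state machine: each whitespace token is split at its commas once and the machine accumulates every slot directly as its list of words, so the joined string, the raw chunk strings and their re-splitting never exist; the trailing-empty-chunk trim becomes the closed condition 'no tokens, or the last token ends with a comma'.
import Mathlib
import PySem

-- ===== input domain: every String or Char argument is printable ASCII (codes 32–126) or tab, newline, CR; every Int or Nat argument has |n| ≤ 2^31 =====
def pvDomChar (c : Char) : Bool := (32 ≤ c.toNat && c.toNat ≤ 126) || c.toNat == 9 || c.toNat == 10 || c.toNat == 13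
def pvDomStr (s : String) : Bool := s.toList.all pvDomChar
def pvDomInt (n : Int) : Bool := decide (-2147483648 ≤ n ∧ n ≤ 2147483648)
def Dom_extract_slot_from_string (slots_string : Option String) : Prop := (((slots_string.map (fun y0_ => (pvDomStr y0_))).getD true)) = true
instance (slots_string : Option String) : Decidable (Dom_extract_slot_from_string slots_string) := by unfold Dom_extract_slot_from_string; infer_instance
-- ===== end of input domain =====

-- B replaces A's join-then-resplit string pipeline by a single token-level comma
-- state machine that accumulates each slot directly as its list of words; same
-- values, no speed claim.

-- module-level constants shared by both Pythons
def pvDOMAINS : List String :=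
  ["attraction", "hotel", "hospital", "restaurant", "police", "taxi", "train"]

def pvNAMED_ENTITY_SLOTS : PySem.Set String :=
  PySem.Set.ofList ["attraction--name", "restaurant--name", "hotel--name",
    "bus--departure", "bus--destination", "taxi--departure", "taxi--destination",
    "train--departure", "train--destination"]

def pvNAMED_ENTITY_INTERESTED : PySem.Set String :=
  PySem.Set.ofList ["restaurant--name", "hotel--name", "attraction--name"]

def pvSlotValConversion : PySem.Dict String String :=
  PySem.Dict.ofList [("centre", "center"), ("3-star", "3"), ("2-star", "2"),
    ("1-star", "1"), ("0-star", "0"), ("4-star", "4"), ("5-star", "5")]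

-- ===== PORT A =====
-- A's loop body: one step of the for-loop over the cleaned comma-chunk strings
def pvStepA
    (st : List String × PySem.Dict String (PySem.Set String) × List String × List String)
    (slot_ : String) :
    List String × PySem.Dict String (PySem.Set String) × List String × List String :=
  let slot := PySem.Str.split₀ slot_
  if 2 < slot.length ∧ slot.headD "" ∈ pvDOMAINS then
    let domain := slot.headD ""
    let tv :=
      if slot.getD 1 "" = "book" ∧ slot.getD 2 "" ∈ ["day", "time", "people", "stay"] then
        (slot.getD 1 "" ++ " " ++ slot.getD 2 "", PySem.Str.join " " (slot.drop 3))
      else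
        (slot.getD 1 "", PySem.Str.join " " (slot.drop 2))
    let slot_type := tv.1
    let slot_val := PySem.Dict.getD pvSlotValConversion tv.2 tv.2
    let slots_list := st.1 ++ [domain ++ "--" ++ slot_type ++ "--" ++ slot_val]
    let pd :=
      match PySem.Dict.get? st.2.1 domain with
      | some s => PySem.Dict.insert st.2.1 domain (PySem.Set.add s (slot_type ++ "--" ++ slot_val))
      | none => PySem.Dict.insert st.2.1 domain (PySem.Set.ofList [slot_type ++ "--" ++ slot_val])
    let ne :=
      if domain ++ "--" ++ slot_type ∈ pvNAMED_ENTITY_SLOTS then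
        st.2.2.1 ++ [domain ++ "--" ++ slot_type ++ "--" ++ slot_val]
      else st.2.2.1
    let nei :=
      if domain ++ "--" ++ slot_type ∈ pvNAMED_ENTITY_INTERESTED then
        st.2.2.2 ++ [domain ++ "--" ++ slot_type ++ "--" ++ slot_val]
      else st.2.2.2
    (slots_list, pd, ne, nei)
  else st

def extract_slot_from_string (slots_string : Option String) : List String × (List (String × List String)) × List String × List String :=
  match slots_string with
  | none => ([], [], [], [])
  | some s =>
    let str_split := PySem.Str.split₀ (PySem.Str.strip s)
    let str_split :=
      if str_split ≠ [] ∧ str_split.headD "" ∈ ["<bs>", "</bs>"] then str_split.tail else str_split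
    let str_split :=
      if "</bs>" ∈ str_split then
        str_split.take ((PySem.List.index? str_split "</bs>").getD 0)
      else str_split
    let str_split := (PySem.Str.split? (PySem.Str.join " " str_split) ",").getD []
    let str_split := if str_split.getLast? = some "" then str_split.dropLast else str_split
    let str_split := str_split.map PySem.Str.strip
    let st := str_split.foldl pvStepA ([], PySem.Dict.empty, [], [])
    (st.1, st.2.1.items, st.2.2.1, st.2.2.2)

-- ===== PORT B =====
-- B's comma segmentation machine: state = (finished word-lists, current word-list);
-- one step consumes one whitespace token, splitting it at its commas
def pvCommaStep (st : List (List String) × List String) (tok : String) :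
    List (List String) × List String :=
  let segs := (PySem.Str.split? tok ",").getD []
  let cur := if segs.headD "" ≠ "" then st.2 ++ [segs.headD ""] else st.2
  segs.tail.foldl (fun s seg => (s.1 ++ [s.2], if seg ≠ "" then [seg] else [])) (st.1, cur)

-- B's loop body over one finished word-list
def pvStepB
    (st : List String × PySem.Dict String (PySem.Set String) × List String × List String)
    (words : List String) :
    List String × PySem.Dict String (PySem.Set String) × List String × List String :=
  if words.length ≤ 2 ∨ words.headD "" ∉ pvDOMAINS then st
  else
    let domain := words.headD ""
    let tr :=
      if words.getD 1 "" = "book" ∧ words.getD 2 "" ∈ ["day", "time", "people", "stay"] then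
        (words.getD 1 "" ++ " " ++ words.getD 2 "", words.drop 3)
      else (words.getD 1 "", words.drop 2)
    let slot_type := tr.1
    let sv := PySem.Str.join " " tr.2
    let slot_val := PySem.Dict.getD pvSlotValConversion sv sv
    let full := domain ++ "--" ++ slot_type ++ "--" ++ slot_val
    let pd := PySem.Dict.insert st.2.1 domain
      (PySem.Set.add (PySem.Dict.getD st.2.1 domain PySem.Set.empty) (slot_type ++ "--" ++ slot_val))
    (st.1 ++ [full], pd,
     if domain ++ "--" ++ slot_type ∈ pvNAMED_ENTITY_SLOTS then st.2.2.1 ++ [full] else st.2.2.1,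
     if domain ++ "--" ++ slot_type ∈ pvNAMED_ENTITY_INTERESTED then st.2.2.2 ++ [full] else st.2.2.2)

def extract_slot_from_string_alt (slots_string : Option String) : List String × (List (String × List String)) × List String × List String :=
  match slots_string with
  | none => ([], [], [], [])
  | some s =>
    let toks := PySem.Str.split₀ s
    let toks := if toks ≠ [] ∧ toks.headD "" ∈ ["<bs>", "</bs>"] then toks.tail else toks
    let toks := toks.takeWhile (fun t => t ≠ "</bs>")
    let pc := toks.foldl pvCommaStep ([], [])
    let parts := pc.1 ++ [pc.2]
    let parts :=
      if toks = [] ∨ ((toks.getLast?.map (fun t => PySem.Str.endswith t ",")).getD false) = true then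
        parts.dropLast
      else parts
    let st := parts.foldl pvStepB ([], PySem.Dict.empty, [], [])
    (st.1, st.2.1.items, st.2.2.1, st.2.2.2)

-- ===== PRECONDITION & SPEC =====
def Spec_extract_slot_from_string (slots_string : Option String) (out : List String × (List (String × List String)) × List String × List String) : Prop := out = extract_slot_from_string_alt slots_string
instance (slots_string : Option String) (out : List String × (List (String × List String)) × List String × List String) : Decidable (Spec_extract_slot_from_string slots_string out) := by unfold Spec_extract_slot_from_string; infer_instance

-- ===== CLAIM (what is proved, stated in full; the proofs are below) =====
def Claim_equal_extract_slot_from_string : Prop := ∀ (slots_string : Option String), Dom_extract_slot_from_string slots_string → Spec_extract_slot_from_string slots_string (extract_slot_from_string slots_string)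

-- ===== LEMMAS AND PROOFS =====

theorem pv_modifyHead_id {α : Type} (l : List α) : List.modifyHead (fun w => w) l = l := by
  cases l <;> simp

def pvWords (s : List Char) : List (List Char) :=
  (s.splitOnP PySem.Chars.isspace).filter (fun w => !w.isEmpty)

theorem pv_split0_go (s : List Char) (cur : List Char) (acc : List (List Char)) :
    PySem.Chars.split₀.go s cur acc =
      acc.reverse ++
        (List.modifyHead (fun w => cur.reverse ++ w) (s.splitOnP PySem.Chars.isspace)).filter
          (fun w => !w.isEmpty) := by
  induction s generalizing cur acc with
  | nil =>
    simp only [PySem.Chars.split₀.go, List.splitOnP_nil, List.modifyHead_cons, List.append_nil,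
      List.filter]
    by_cases h : cur = []
    · simp [h]
    · have he : cur.isEmpty = false := by simpa using h
      have he2 : cur.reverse.isEmpty = false := by simpa using h
      simp [he, he2]
  | cons c s ih =>
    rw [List.splitOnP_cons]
    by_cases hc : PySem.Chars.isspace c
    · rw [if_pos hc]
      simp only [PySem.Chars.split₀.go, hc, if_true]
      by_cases h : cur = []
      · subst h
        simp only [List.isEmpty_nil, if_true, ih]
        simp [pv_modifyHead_id]
      · have he : cur.isEmpty = false := by simpa using h
        have he2 : cur.reverse.isEmpty = false := by simpa using h
        rw [if_neg (by simp [he]), ih]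
        simp [pv_modifyHead_id, he2]
    · rw [if_neg hc]
      simp only [PySem.Chars.split₀.go, hc, if_false, Bool.false_eq_true]
      rw [ih]
      congr 1
      cases hsp : s.splitOnP PySem.Chars.isspace with
      | nil => exact absurd hsp (List.splitOnP_ne_nil _ _)
      | cons h t => simp

theorem pv_split0_eq (s : List Char) : PySem.Chars.split₀ s = pvWords s := by
  rw [PySem.Chars.split₀, pv_split0_go]
  simp [pvWords, pv_modifyHead_id]

theorem pv_splitOn_go (c : Char) (l : List Char) (fuel : Nat) (cur : List Char)
    (acc : List (List Char)) (h : l.length < fuel) :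
    PySem.Chars.splitOn.go [c] fuel l cur acc =
      acc.reverse ++ List.modifyHead (fun w => cur.reverse ++ w) (l.splitOnP (· == c)) := by
  induction l generalizing fuel cur acc with
  | nil =>
    cases fuel with
    | zero => omega
    | succ f => simp [PySem.Chars.splitOn.go, List.splitOnP_nil]
  | cons x xs ih =>
    cases fuel with
    | zero => omega
    | succ f =>
      rw [List.splitOnP_cons]
      by_cases hx : x = c
      · subst hx
        have hpre : ([x].isPrefixOf (x :: xs)) = true := by simp [List.isPrefixOf]
        simp only [PySem.Chars.splitOn.go, hpre, if_true, List.length_cons] at *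
        have hdrop : List.drop ([x].length) (x :: xs) = xs := by simp
        simp only [List.length_nil] at hdrop ⊢
        rw [show List.drop (0+1) (x :: xs) = xs from by simp,
          ih f [] (cur.reverse :: acc) (by omega)]
        simp [pv_modifyHead_id]
      · have hpre : ([c].isPrefixOf (x :: xs)) = false := by
          simp [List.isPrefixOf]
          exact fun hh => absurd hh.symm hx
        simp only [PySem.Chars.splitOn.go, hpre, if_false, Bool.false_eq_true]
        rw [ih f (x :: cur) acc (by simp at h ⊢; omega)]
        have : (x == c) = false := by simpa using hx
        simp only [this, if_false, Bool.false_eq_true]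
        congr 1
        cases hsp : xs.splitOnP (· == c) with
        | nil => exact absurd hsp (List.splitOnP_ne_nil _ _)
        | cons hh tt => simp

theorem pv_splitOn_eq (s : List Char) (c : Char) :
    PySem.Chars.splitOn s [c] = List.splitOn c s := by
  rw [PySem.Chars.splitOn, pv_splitOn_go c s (s.length + 1) [] [] (by omega)]
  simp [List.splitOn, pv_modifyHead_id]

theorem pv_chunks_flat {α : Type} (p : α → Bool) (s : List α) :
    ∀ w ∈ s.splitOnP p, ∀ x ∈ w, x ∈ s ∧ p x = false := by
  induction s with
  | nil => intro w hw x hx; simp at hw; subst hw; simp at hx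
  | cons a s ih =>
    intro w hw x hx
    rw [List.splitOnP_cons] at hw
    by_cases ha : p a
    · rw [if_pos ha] at hw
      rcases List.mem_cons.mp hw with hw | hw
      · subst hw; simp at hx
      · have := ih w hw x hx; exact ⟨List.mem_cons_of_mem _ this.1, this.2⟩
    · rw [if_neg ha] at hw
      cases hsp : s.splitOnP p with
      | nil => exact absurd hsp (List.splitOnP_ne_nil _ _)
      | cons h t =>
        rw [hsp, List.modifyHead_cons] at hw
        rcases List.mem_cons.mp hw with hw | hw
        · subst hw
          rcases List.mem_cons.mp hx with hx | hx
          · subst hx; exact ⟨List.mem_cons_self, by simpa using ha⟩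
          · have := ih h (by rw [hsp]; exact List.mem_cons_self) x hx
            exact ⟨List.mem_cons_of_mem _ this.1, this.2⟩
        · have := ih w (by rw [hsp]; exact List.mem_cons_of_mem _ hw) x hx
          exact ⟨List.mem_cons_of_mem _ this.1, this.2⟩

theorem pv_splitOnP_append {α : Type} (p : α → Bool) (xs ys : List α) :
    (xs ++ ys).splitOnP p =
      (xs.splitOnP p).dropLast ++
        List.modifyHead (fun w => (xs.splitOnP p).getLastD [] ++ w) (ys.splitOnP p) := by
  induction xs with
  | nil => simp [List.splitOnP_nil, pv_modifyHead_id]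
  | cons a xs ih =>
    rw [List.cons_append, List.splitOnP_cons, List.splitOnP_cons]
    by_cases ha : p a
    · rw [if_pos ha, if_pos ha, ih]
      cases hsp : xs.splitOnP p with
      | nil => exact absurd hsp (List.splitOnP_ne_nil _ _)
      | cons h t => simp
    · rw [if_neg ha, if_neg ha, ih]
      cases hsp : xs.splitOnP p with
      | nil => exact absurd hsp (List.splitOnP_ne_nil _ _)
      | cons h t =>
        cases t with
        | nil =>
          simp only [List.modifyHead_cons]
          simp only [List.dropLast, List.getLastD, List.nil_append]
          cases hsy : ys.splitOnP p with
          | nil => exact absurd hsy (List.splitOnP_ne_nil _ _)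
          | cons hy ty => simp
        | cons h2 t2 => simp

theorem pv_dropLast_append_getLastD {α : Type} (l : List α) (hl : l ≠ []) (d : α) :
    l.dropLast ++ [l.getLastD d] = l := by
  rw [List.getLastD_eq_getLast?, List.getLast?_eq_some_getLast hl]
  simpa using List.dropLast_concat_getLast hl

theorem pv_splitOnP_snoc_p {α : Type} (p : α → Bool) (xs : List α) (c : α) (hc : p c = true) :
    (xs ++ [c]).splitOnP p = xs.splitOnP p ++ [[]] := by
  rw [pv_splitOnP_append]
  have : ([c] : List α).splitOnP p = [[], []] := by
    rw [show ([c] : List α) = [] ++ [c] from rfl] at *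
    simp [List.splitOnP_cons, hc]
  rw [this]
  cases hsp : xs.splitOnP p with
  | nil => exact absurd hsp (List.splitOnP_ne_nil _ _)
  | cons h t =>
    simp only [List.modifyHead_cons, List.append_nil, List.getLastD_eq_getLast?]
    rw [← hsp]
    have := List.dropLast_concat_getLast (l := xs.splitOnP p) (List.splitOnP_ne_nil _ _)
    conv_rhs => rw [← this]
    rw [List.getLast?_eq_some_getLast (List.splitOnP_ne_nil _ _)]
    simp

theorem pv_splitOnP_snoc_np {α : Type} (p : α → Bool) (xs : List α) (c : α) (hc : p c = false) :
    (xs ++ [c]).splitOnP p = (xs.splitOnP p).dropLast ++ [(xs.splitOnP p).getLastD [] ++ [c]] := by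
  rw [pv_splitOnP_append]
  have : ([c] : List α).splitOnP p = [[c]] := by
    rw [show ([c] : List α) = [] ++ [c] from rfl] at *
    simp [List.splitOnP_cons, hc]
  rw [this]
  rfl

theorem pv_words_cut (x y : List Char) :
    pvWords (x ++ ' ' :: y) = pvWords x ++ pvWords y := by
  unfold pvWords
  have hg : ((List.splitOnP PySem.Chars.isspace x ++ [[]]).getLastD ([] : List Char)) = [] := by
    simp
  rw [show x ++ ' ' :: y = (x ++ [' ']) ++ y by simp, pv_splitOnP_append,
    pv_splitOnP_snoc_p _ _ _ (by decide), List.dropLast_concat, hg]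
  simp only [List.nil_append]
  rw [pv_modifyHead_id, List.filter_append]

theorem pv_splitOnP_of_clean {α : Type} (p : α → Bool) (s : List α)
    (h : ∀ x ∈ s, p x = false) : s.splitOnP p = [s] := by
  induction s with
  | nil => simp
  | cons a s ih =>
    rw [List.splitOnP_cons, if_neg (by simp [h a List.mem_cons_self]),
      ih (fun x hx => h x (List.mem_cons_of_mem _ hx))]
    simp

theorem pv_words_clean (s : List Char) (h : ∀ x ∈ s, PySem.Chars.isspace x = false) :
    pvWords s = if s.isEmpty then [] else [s] := by
  unfold pvWords
  rw [pv_splitOnP_of_clean _ _ h]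
  by_cases hs : s = []
  · subst hs; simp
  · have : s.isEmpty = false := by simpa using hs
    simp [this]

theorem pv_words_dropWhile (s : List Char) :
    pvWords (s.dropWhile PySem.Chars.isspace) = pvWords s := by
  induction s with
  | nil => rfl
  | cons a s ih =>
    by_cases ha : PySem.Chars.isspace a
    · rw [List.dropWhile_cons_of_pos ha, ih]
      unfold pvWords
      rw [List.splitOnP_cons, if_pos ha]
      simp
    · rw [List.dropWhile_cons_of_neg ha]

theorem pv_words_snoc_space (xs : List Char) (c : Char) (hc : PySem.Chars.isspace c = true) :
    pvWords (xs ++ [c]) = pvWords xs := by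
  unfold pvWords
  rw [pv_splitOnP_snoc_p _ _ _ hc]
  simp

theorem pv_words_append_spaces (xs t : List Char) (ht : ∀ x ∈ t, PySem.Chars.isspace x = true) :
    pvWords (xs ++ t) = pvWords xs := by
  induction t using List.reverseRecOn with
  | nil => simp
  | append_singleton t c ih =>
    rw [← List.append_assoc, pv_words_snoc_space _ _ (ht c (by simp)),
      ih (fun x hx => ht x (by simp [hx]))]

theorem pv_words_strip (s : List Char) : pvWords (PySem.Chars.strip s) = pvWords s := by
  rw [PySem.Chars.strip, PySem.Chars.rstrip, PySem.Chars.lstrip]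
  rw [← pv_words_dropWhile s]
  set m := List.dropWhile PySem.Chars.isspace s with hm
  have hsplit : m = (List.dropWhile PySem.Chars.isspace m.reverse).reverse ++
      (List.takeWhile PySem.Chars.isspace m.reverse).reverse := by
    conv_lhs => rw [← List.reverse_reverse m, ← List.takeWhile_append_dropWhile
      (p := PySem.Chars.isspace) (l := m.reverse)]
    rw [List.reverse_append]
  conv_rhs => rw [hsplit]
  rw [pv_words_append_spaces]
  intro x hx
  rw [List.mem_reverse] at hx
  exact List.mem_takeWhile_imp hx

theorem pv_split0_strip (s : String) :
    PySem.Str.split₀ (PySem.Str.strip s) = PySem.Str.split₀ s := by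
  rw [PySem.Str.split₀, PySem.Str.split₀]
  have : (PySem.Str.strip s).toList = PySem.Chars.strip s.toList := by
    simp [PySem.Str.strip]
  rw [this, pv_split0_eq, pv_split0_eq, pv_words_strip]

theorem pv_take_idx {α : Type} [DecidableEq α] (l : List α) (v : α) :
    (if v ∈ l then l.take ((PySem.List.index? l v).getD 0) else l) =
      l.takeWhile (fun t => t ≠ v) := by
  rw [PySem.List.index?]
  induction l with
  | nil => simp
  | cons a l ih =>
    by_cases hav : a = v
    · subst hav
      simp [List.idxOf?_cons]
    · have h1 : (a == v) = false := by simpa using hav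
      by_cases hm : v ∈ l
      · rw [if_pos (List.mem_cons_of_mem _ hm), List.idxOf?_cons, if_neg (by simp [h1])]
        rw [if_pos hm] at ih
        rcases ho : List.idxOf? v l with _ | n
        · rw [List.idxOf?_eq_none_iff] at ho
          exact absurd hm ho
        · rw [ho] at ih
          simp only [Option.map_some, Option.getD_some] at ih ⊢
          rw [List.take_succ_cons, ih, List.takeWhile_cons, if_pos (by simpa using hav)]
      · have hm2 : v ∉ a :: l := by
          intro hx
          rcases List.mem_cons.mp hx with hx | hx
          · exact hav hx.symm
          · exact hm hx
        rw [if_neg hm2, List.takeWhile_cons, if_pos (by simpa using hav)]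
        rw [if_neg hm] at ih
        rw [← ih]

theorem pv_getLast_splitOnP {α : Type} (p : α → Bool) (s : List α) :
    ((s.splitOnP p).getLastD [] = [] ↔
      (s = [] ∨ ∃ c, s.getLast? = some c ∧ p c = true)) := by
  induction s using List.reverseRecOn with
  | nil => simp
  | append_singleton s c _ =>
    by_cases hc : p c
    · rw [pv_splitOnP_snoc_p _ _ _ hc]
      simp [hc]
    · rw [pv_splitOnP_snoc_np _ _ _ (by simpa using hc)]
      simp [hc]

theorem pv_getLast?_append {α : Type} (a b : List α) (h : b ≠ []) :
    (a ++ b).getLast? = b.getLast? := by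
  rw [List.getLast?_append]
  cases hb : b.getLast? with
  | none => rw [List.getLast?_eq_none_iff] at hb; exact absurd hb h
  | some x => rfl

theorem pv_intercalate_cons (t : List Char) (ts : List (List Char)) (h : ts ≠ []) :
    List.intercalate [' '] (t :: ts) = t ++ ' ' :: List.intercalate [' '] ts := by
  cases ts with
  | nil => exact absurd rfl h
  | cons b l => simp [List.intercalate]

theorem pv_intercalate_ne_nil (toks : List (List Char)) (h : toks ≠ [])
    (hne : ∀ t ∈ toks, t ≠ []) : List.intercalate [' '] toks ≠ [] := by
  cases toks with
  | nil => exact absurd rfl h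
  | cons t ts =>
    cases ts with
    | nil =>
      simp only [List.intercalate]
      simpa using hne t List.mem_cons_self
    | cons b l =>
      rw [pv_intercalate_cons _ _ (by simp)]
      simp

theorem pv_intercalate_getLast? (toks : List (List Char)) (h : toks ≠ [])
    (hne : ∀ t ∈ toks, t ≠ []) :
    (List.intercalate [' '] toks).getLast? = (toks.getLastD []).getLast? := by
  induction toks with
  | nil => exact absurd rfl h
  | cons t ts ih =>
    cases hts : ts with
    | nil => simp [List.intercalate]
    | cons b l =>
      subst hts
      rw [pv_intercalate_cons _ _ (by simp)]
      rw [show t ++ ' ' :: List.intercalate [' '] (b :: l) =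
          t ++ ([' '] ++ List.intercalate [' '] (b :: l)) from by simp]
      rw [pv_getLast?_append _ _ (by simp), pv_getLast?_append _ _
        (pv_intercalate_ne_nil (b :: l) (by simp) (fun x hx => hne x (List.mem_cons_of_mem _ hx)))]
      rw [ih (by simp) (fun x hx => hne x (List.mem_cons_of_mem _ hx))]
      simp [List.getLastD_eq_getLast?]

theorem pv_trailing (toks : List (List Char)) (hne : ∀ t ∈ toks, t ≠ []) :
    ((List.splitOn ',' (List.intercalate [' '] toks)).getLastD [] = [] ↔
      (toks = [] ∨ ∃ t, toks.getLast? = some t ∧ t.getLastD ' ' = ',')) := by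
  rw [List.splitOn, pv_getLast_splitOnP]
  constructor
  · rintro (hj | ⟨c, hc, hcc⟩)
    · left
      by_contra ht
      exact pv_intercalate_ne_nil toks ht hne hj
    · right
      have ht : toks ≠ [] := by
        rintro rfl
        simp [List.intercalate] at hc
      rw [pv_intercalate_getLast? toks ht hne] at hc
      cases htl : toks.getLast? with
      | none => rw [List.getLast?_eq_none_iff] at htl; exact absurd htl ht
      | some t =>
        refine ⟨t, rfl, ?_⟩
        have : toks.getLastD [] = t := by simp [List.getLastD_eq_getLast?, htl]
        rw [this] at hc
        rw [List.getLastD_eq_getLast?, hc]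
        simpa using hcc
  · rintro (rfl | ⟨t, ht, hcomma⟩)
    · left; simp [List.intercalate]
    · right
      have htoks : toks ≠ [] := by rintro rfl; simp at ht
      have htn : t ≠ [] := hne t (List.mem_of_getLast? ht)
      refine ⟨',', ?_, by simp⟩
      rw [pv_intercalate_getLast? toks htoks hne]
      have : toks.getLastD [] = t := by simp [List.getLastD_eq_getLast?, ht]
      rw [this]
      cases htl : t.getLast? with
      | none => rw [List.getLast?_eq_none_iff] at htl; exact absurd htl htn
      | some c =>
        rw [List.getLastD_eq_getLast?, htl] at hcomma
        simp at hcomma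
        rw [hcomma]

theorem pv_modifyHead_comp {α : Type} (f g : α → α) (l : List α) :
    List.modifyHead f (List.modifyHead g l) = List.modifyHead (fun x => f (g x)) l := by
  cases l <;> simp

theorem pv_map_modifyHead_cut (g : List Char) (M : List (List Char)) :
    (List.modifyHead (fun w => g ++ ' ' :: w) M).map pvWords =
      List.modifyHead (fun w => pvWords g ++ w) (M.map pvWords) := by
  cases M with
  | nil => rfl
  | cons m M' => simp [pv_words_cut]

theorem pv_getLastD_map (f : List Char → List (List Char)) (l : List (List Char))
    (h : l ≠ []) : (l.map f).getLastD [] = f (l.getLastD []) := by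
  cases hl : l.getLast? with
  | none => rw [List.getLast?_eq_none_iff] at hl; exact absurd hl h
  | some x =>
    rw [List.getLastD_eq_getLast?, List.getLastD_eq_getLast?, hl, List.getLast?_map, hl]
    rfl

-- segments of a whitespace-free token are whitespace-free words

theorem pv_seg_words (tok : List Char) (hct : ∀ c ∈ tok, PySem.Chars.isspace c = false) :
    ∀ seg ∈ List.splitOn ',' tok, pvWords seg = if seg.isEmpty then [] else [seg] := by
  intro seg hseg
  refine pv_words_clean seg (fun x hx => ?_)
  exact hct x (pv_chunks_flat _ tok seg hseg x hx).1

theorem pv_inner (L : List (List Char)) (P : List (List (List Char))) (C : List (List Char))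
    (segW : List Char → List (List Char)) (hsegW : ∀ seg ∈ L, segW seg = if seg ≠ [] then [seg] else []) :
    L.foldl (fun s seg => (s.1 ++ [s.2], if seg ≠ [] then [seg] else [])) (P, C) =
      ((P ++ [C] ++ L.map segW).dropLast, (P ++ [C] ++ L.map segW).getLastD []) := by
  induction L generalizing P C with
  | nil => simp
  | cons seg L ih =>
    rw [List.foldl_cons, ih _ _ (fun x hx => hsegW x (List.mem_cons_of_mem _ hx))]
    rw [List.map_cons, hsegW seg List.mem_cons_self]
    simp

def pvCStep (st : List (List (List Char)) × List (List Char)) (tok : List Char) :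
    List (List (List Char)) × List (List Char) :=
  let segs := List.splitOn ',' tok
  let cur := if segs.headD [] ≠ [] then st.2 ++ [segs.headD []] else st.2
  segs.tail.foldl (fun s seg => (s.1 ++ [s.2], if seg ≠ [] then [seg] else [])) (st.1, cur)

def pvLift (st : List (List (List Char)) × List (List Char)) :
    List (List String) × List String :=
  (st.1.map (fun ws => ws.map String.ofList), st.2.map String.ofList)

theorem pv_cstep (P : List (List (List Char))) (C : List (List Char)) (tok : List Char)
    (hct : ∀ c ∈ tok, PySem.Chars.isspace c = false) :
    pvCStep (P, C) tok =
      ((P ++ List.modifyHead (fun w => C ++ w) ((List.splitOn ',' tok).map pvWords)).dropLast,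
       (P ++ List.modifyHead (fun w => C ++ w) ((List.splitOn ',' tok).map pvWords)).getLastD []) := by
  unfold pvCStep
  cases hS : List.splitOn ',' tok with
  | nil => exact absurd hS (by rw [List.splitOn]; exact List.splitOnP_ne_nil _ _)
  | cons s0 rest =>
    have hw := pv_seg_words tok hct
    rw [hS] at hw
    have hw0 : pvWords s0 = if s0.isEmpty then [] else [s0] := hw s0 List.mem_cons_self
    simp only [List.headD_cons, List.tail_cons]
    rw [pv_inner rest P _ pvWords (fun seg hseg => by
      rw [hw seg (List.mem_cons_of_mem _ hseg)]
      by_cases h : seg = [] <;> simp [h])]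
    have hcur : (if s0 ≠ [] then C ++ [s0] else C) = C ++ pvWords s0 := by
      rw [hw0]
      by_cases h : s0 = [] <;> simp [h]
    rw [hcur, List.map_cons, List.modifyHead_cons]
    simp [List.append_assoc]

theorem pv_machine (toks : List (List Char))
    (hns : ∀ t ∈ toks, ∀ c ∈ t, PySem.Chars.isspace c = false)
    (P : List (List (List Char))) (C : List (List Char)) :
    toks.foldl pvCStep (P, C) =
      ((P ++ List.modifyHead (fun w => C ++ w)
          ((List.splitOn ',' (List.intercalate [' '] toks)).map pvWords)).dropLast,
       (P ++ List.modifyHead (fun w => C ++ w)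
          ((List.splitOn ',' (List.intercalate [' '] toks)).map pvWords)).getLastD []) := by
  induction toks generalizing P C with
  | nil =>
    have : List.intercalate [' '] ([] : List (List Char)) = [] := by simp [List.intercalate]
    rw [List.foldl_nil, this]
    have h2 : List.splitOn ',' ([] : List Char) = [[]] := by
      rw [List.splitOn, List.splitOnP_nil]
    rw [h2]
    simp [pvWords]
  | cons t ts ih =>
    rw [List.foldl_cons, pv_cstep _ _ _ (hns t List.mem_cons_self),
      ih (fun x hx => hns x (List.mem_cons_of_mem _ hx))]
    set MS := (List.splitOn ',' t).map pvWords with hMS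
    have hMSne : MS ≠ [] := by
      rw [hMS]
      simp only [ne_eq, List.map_eq_nil_iff]
      rw [List.splitOn]
      exact List.splitOnP_ne_nil _ _
    cases hts : ts with
    | nil =>
      -- foldl over [] on both sides: intercalate [t] = t
      have h1 : List.intercalate [' '] [t] = t := by simp [List.intercalate]
      have h2 : List.intercalate [' '] ([] : List (List Char)) = [] := by simp [List.intercalate]
      rw [h1, h2]
      have h3 : List.splitOn ',' ([] : List Char) = [[]] := by
        rw [List.splitOn, List.splitOnP_nil]
      rw [h3]
      have h4 : (([[]] : List (List Char)).map pvWords) = [[]] := by simp [pvWords]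
      rw [h4]
      set R := P ++ List.modifyHead (fun w => C ++ w) MS with hR
      have hRne : R ≠ [] := by
        rw [hR]
        cases hm : MS with
        | nil => exact absurd hm hMSne
        | cons a b => simp
      have h5 : List.modifyHead (fun w => R.getLastD [] ++ w) [[]] = [R.getLastD []] := by simp
      rw [h5]
      have h6 : R.dropLast ++ [R.getLastD []] = R := by
        rw [List.getLastD_eq_getLast?, List.getLast?_eq_some_getLast hRne]
        simpa using List.dropLast_concat_getLast hRne
      rw [h6]
    | cons b l =>
      -- joined (t :: ts) = t ++ ' ' :: joined ts
      have hcons : List.intercalate [' '] (t :: b :: l) =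
          t ++ ' ' :: List.intercalate [' '] (b :: l) := by simp [List.intercalate]
      rw [hcons]
      set I := List.intercalate [' '] (b :: l) with hI
      have hsplit : List.splitOn ',' (t ++ ' ' :: I) =
          (List.splitOn ',' t).dropLast ++
            List.modifyHead (fun w => (List.splitOn ',' t).getLastD [] ++ ' ' :: w)
              (List.splitOn ',' I) := by
        rw [show t ++ ' ' :: I = t ++ (' ' :: I) from rfl]
        rw [show List.splitOn ',' (t ++ (' ' :: I)) = (t ++ (' ' :: I)).splitOnP (· == ',') from rfl,
          pv_splitOnP_append]
        rw [show (' ' :: I).splitOnP (· == ',') = List.splitOn ',' (' ' :: I) from rfl]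
        rw [show List.splitOn ',' (' ' :: I) = List.modifyHead (fun w => ' ' :: w) (List.splitOn ',' I) from by
          rw [List.splitOn, List.splitOnP_cons, if_neg (by decide)]
          rfl]
        rw [pv_modifyHead_comp]
        rfl
      rw [hsplit]
      rw [List.map_append, pv_map_modifyHead_cut]
      -- now pure list algebra on MS and M := map pvWords (splitOn ',' I)
      set M := (List.splitOn ',' I).map pvWords with hM
      have hMne : M ≠ [] := by
        rw [hM]
        simp only [ne_eq, List.map_eq_nil_iff]
        rw [List.splitOn]
        exact List.splitOnP_ne_nil _ _
      rw [List.map_dropLast, ← hMS]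
      rw [show (List.splitOn ',' t).getLastD [] = ((List.splitOn ',' t)).getLastD [] from rfl]
      have hgl : pvWords ((List.splitOn ',' t).getLastD []) = MS.getLastD [] := by
        rw [hMS, pv_getLastD_map]
        rw [List.splitOn]
        exact List.splitOnP_ne_nil _ _
      rw [hgl]
      -- case on MS
      cases hms : MS with
      | nil => exact absurd hms hMSne
      | cons w0 WS =>
        cases hws : WS with
        | nil =>
          cases hmm : M with
          | nil => exact absurd hmm hMne
          | cons m0 M' =>
            simp [List.append_assoc, List.getLastD_eq_getLast?, List.getLast?_append]
        | cons w1 WS' =>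
          cases hmm : M with
          | nil => exact absurd hmm hMne
          | cons m0 M' =>
            have h9 : (w1 :: WS').getLast? = some ((w1 :: WS').getLast (by simp)) :=
              List.getLast?_eq_some_getLast (by simp)
            simp [List.append_assoc, List.getLastD_eq_getLast?, List.getLast?_append, h9]

theorem pv_ofList_ne_empty (l : List Char) : (String.ofList l ≠ "") ↔ l ≠ [] := by
  constructor
  · rintro h rfl; exact h rfl
  · intro h hc
    have := congrArg String.toList hc
    simp at this
    exact h this

theorem pv_inner_lift (L : List (List Char)) (P : List (List (List Char))) (C : List (List Char)) :
    (L.map String.ofList).foldl (fun s seg => (s.1 ++ [s.2], if seg ≠ "" then [seg] else []))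
      (P.map (fun ws => ws.map String.ofList), C.map String.ofList) =
    pvLift (L.foldl (fun s seg => (s.1 ++ [s.2], if seg ≠ [] then [seg] else [])) (P, C)) := by
  induction L generalizing P C with
  | nil => rfl
  | cons r L ih =>
    simp only [List.map_cons, List.foldl_cons]
    have hr : (if String.ofList r ≠ "" then [String.ofList r] else []) =
        (if r ≠ [] then [r] else []).map String.ofList := by
      by_cases h : r = []
      · simp [h]
      · rw [if_pos ((pv_ofList_ne_empty r).mpr h), if_pos h]
        simp
    have hP : (P.map (fun ws => ws.map String.ofList)) ++ [C.map String.ofList] =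
        (P ++ [C]).map (fun ws => ws.map String.ofList) := by simp
    rw [hr, hP, ih (P ++ [C]) (if r ≠ [] then [r] else [])]

theorem pv_commaStep_lift (st : List (List (List Char)) × List (List Char)) (t : String) :
    pvCommaStep (pvLift st) t = pvLift (pvCStep st t.toList) := by
  obtain ⟨P, C⟩ := st
  unfold pvCommaStep pvCStep pvLift
  have hsegs : (PySem.Str.split? t ",").getD [] = (List.splitOn ',' t.toList).map String.ofList := by
    simp [PySem.Str.split?, PySem.Chars.split?]
    rw [pv_splitOn_eq]
  rw [hsegs]
  cases hS : List.splitOn ',' t.toList with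
  | nil => simp
  | cons s0 rest =>
    simp only [List.map_cons, List.headD_cons, List.tail_cons]
    have hcur : (if String.ofList s0 ≠ "" then C.map String.ofList ++ [String.ofList s0]
        else C.map String.ofList) =
        (if s0 ≠ [] then C ++ [s0] else C).map String.ofList := by
      by_cases h : s0 = []
      · simp [h]
      · rw [if_pos ((pv_ofList_ne_empty s0).mpr h), if_pos h]
        simp
    rw [hcur]
    exact pv_inner_lift rest P _

set_option maxHeartbeats 1000000 in
theorem pv_stepA_eq (st : List String × PySem.Dict String (PySem.Set String) × List String × List String)
    (p : String) : pvStepA st p = pvStepB st (PySem.Str.split₀ p) := by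
  obtain ⟨sl, pd, ne, nei⟩ := st
  unfold pvStepA pvStepB
  generalize PySem.Str.split₀ p = w
  by_cases h1 : 2 < w.length ∧ w.headD "" ∈ pvDOMAINS
  · have hng : ¬(w.length ≤ 2 ∨ w.headD "" ∉ pvDOMAINS) := by
      rintro (h | h)
      · omega
      · exact h h1.2
    rw [if_pos h1]
    conv_rhs => rw [if_neg hng]
    by_cases h2 : w.getD 1 "" = "book" ∧ w.getD 2 "" ∈ ["day", "time", "people", "stay"]
    · rw [if_pos h2, if_pos h2]
      dsimp only
      cases hd : PySem.Dict.get? pd (w.headD "") with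
      | some s0 =>
        simp only [PySem.Dict.getD_eq_get?_getD, hd]
        rfl
      | none =>
        simp only [PySem.Dict.getD_eq_get?_getD, hd]
        rfl
    · rw [if_neg h2, if_neg h2]
      dsimp only
      cases hd : PySem.Dict.get? pd (w.headD "") with
      | some s0 =>
        simp only [PySem.Dict.getD_eq_get?_getD, hd]
        rfl
      | none =>
        simp only [PySem.Dict.getD_eq_get?_getD, hd]
        rfl
  · have hpg : (w.length ≤ 2 ∨ w.headD "" ∉ pvDOMAINS) := by
      by_cases hl : 2 < w.length
      · right
        intro hm
        exact h1 ⟨hl, hm⟩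
      · left
        omega
    rw [if_neg h1, if_pos hpg]


-- lift the String-level comma machine fold to the char level
theorem pv_fold_lift (toks : List String) (cst : List (List (List Char)) × List (List Char)) :
    toks.foldl pvCommaStep (pvLift cst) =
      pvLift ((toks.map String.toList).foldl pvCStep cst) := by
  induction toks generalizing cst with
  | nil => rfl
  | cons t toks ih =>
    rw [List.map_cons, List.foldl_cons, List.foldl_cons, pv_commaStep_lift, ih]

theorem pv_endswith_comma (t : String) :
    (PySem.Str.endswith t "," = true) ↔ t.toList.getLast? = some ',' := by
  rw [show PySem.Str.endswith t "," = PySem.Chars.endswith t.toList [','] from rfl,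
    PySem.Chars.endswith_iff]
  rw [← List.reverse_prefix]
  cases hr : t.toList.reverse with
  | nil => simp [← List.head?_reverse, hr]
  | cons c cs =>
    constructor
    · intro hp
      rcases hp with ⟨u, hu⟩
      simp only [List.reverse_cons, List.reverse_nil, List.nil_append,
        List.singleton_append] at hu
      rw [← List.head?_reverse, hr]
      cases hu
      rfl
    · intro hl
      rw [← List.head?_reverse, hr] at hl
      simp at hl
      subst hl
      exact ⟨cs, rfl⟩

-- A's per-part fold over stripped strings equals B's fold over the word lists
theorem pv_foldAB (l : List String)
    (st : List String × PySem.Dict String (PySem.Set String) × List String × List String) :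
    (l.map PySem.Str.strip).foldl pvStepA st = (l.map PySem.Str.split₀).foldl pvStepB st := by
  induction l generalizing st with
  | nil => rfl
  | cons p l ih =>
    rw [List.map_cons, List.map_cons, List.foldl_cons, List.foldl_cons, pv_stepA_eq,
      pv_split0_strip, ih]


set_option maxHeartbeats 1000000 in
-- the whole pipeline after the <bs>-head trim: A's join/resplit/strip/split = B's machine
theorem pv_core (ts1 : List String)
    (H : ∀ t ∈ ts1, t.toList ≠ [] ∧ ∀ c ∈ t.toList, PySem.Chars.isspace c = false) :
    (let str_split := if "</bs>" ∈ ts1 then ts1.take ((PySem.List.index? ts1 "</bs>").getD 0) else ts1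
     let str_split2 := (PySem.Str.split? (PySem.Str.join " " str_split) ",").getD []
     let str_split3 := if str_split2.getLast? = some "" then str_split2.dropLast else str_split2
     let str_split4 := str_split3.map PySem.Str.strip
     let st := str_split4.foldl pvStepA ([], PySem.Dict.empty, [], [])
     (st.1, st.2.1.items, st.2.2.1, st.2.2.2)) =
    (let toks := ts1.takeWhile (fun t => t ≠ "</bs>")
     let pc := toks.foldl pvCommaStep ([], [])
     let parts := pc.1 ++ [pc.2]
     let parts2 := if toks = [] ∨ ((toks.getLast?.map (fun t => PySem.Str.endswith t ",")).getD false) = true then parts.dropLast else parts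
     let st := parts2.foldl pvStepB ([], PySem.Dict.empty, [], [])
     (st.1, st.2.1.items, st.2.2.1, st.2.2.2)) := by
  rw [pv_take_idx ts1 "</bs>"]
  set toks := ts1.takeWhile (fun t => t ≠ "</bs>") with htoks
  have Htoks : ∀ t ∈ toks, t.toList ≠ [] ∧ ∀ c ∈ t.toList, PySem.Chars.isspace c = false :=
    fun t ht => H t ((List.takeWhile_prefix _).subset ht)
  set ctoks := toks.map String.toList with hctoks
  have hne : ∀ ct ∈ ctoks, ct ≠ [] := by
    intro ct hct
    rw [hctoks] at hct
    rcases List.mem_map.mp hct with ⟨t, ht, rfl⟩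
    exact (Htoks t ht).1
  have hns : ∀ ct ∈ ctoks, ∀ c ∈ ct, PySem.Chars.isspace c = false := by
    intro ct hct
    rw [hctoks] at hct
    rcases List.mem_map.mp hct with ⟨t, ht, rfl⟩
    exact (Htoks t ht).2
  set CH := List.splitOn ',' (List.intercalate [' '] ctoks) with hCH
  have hCHne : CH ≠ [] := by
    rw [hCH, List.splitOn]
    exact List.splitOnP_ne_nil _ _
  set Q := CH.map pvWords with hQ
  have hQne : Q ≠ [] := by
    rw [hQ]
    simpa using hCHne
  -- A's raw comma chunks
  have hparts : (PySem.Str.split? (PySem.Str.join " " toks) ",").getD [] =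
      CH.map String.ofList := by
    simp only [PySem.Str.split?, PySem.Chars.split?]
    have hjl : (PySem.Str.join " " toks).toList = List.intercalate [' '] ctoks := by
      simp [PySem.Str.join, PySem.Chars.join, hctoks]
    rw [if_neg (by simp)]
    simp only [Option.map_some, Option.getD_some]
    rw [hjl, show ("," : String).toList = [','] from rfl, pv_splitOn_eq, ← hCH]
  -- B's machine result
  have hmach : toks.foldl pvCommaStep ([], []) = (Q.dropLast.map (fun ws => ws.map String.ofList),
      (Q.getLastD []).map String.ofList) := by
    rw [show (([], []) : List (List String) × List String) = pvLift ([], []) from rfl,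
      pv_fold_lift, ← hctoks, pv_machine ctoks hns [] []]
    simp only [List.nil_append]
    rw [pv_modifyHead_id, ← hCH, ← hQ]
    rfl
  -- B's untrimmed part list
  have hlift_parts : ∀ {α β : Type} (F : α → β) (X : List α) (d : α), X ≠ [] →
      X.dropLast.map F ++ [F (X.getLastD d)] = X.map F := by
    intro α β F X d hX
    conv_rhs => rw [← pv_dropLast_append_getLastD X hX d]
    rw [List.map_append]
    rfl
  have hBparts : (toks.foldl pvCommaStep ([], [])).1 ++ [(toks.foldl pvCommaStep ([], [])).2] =
      Q.map (fun ws => ws.map String.ofList) := by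
    rw [hmach]
    exact hlift_parts (fun ws => ws.map String.ofList) Q [] hQne
  -- the two trimming conditions agree
  have hcond : ((CH.map String.ofList).getLast? = some "") ↔
      (toks = [] ∨ ((toks.getLast?.map (fun t => PySem.Str.endswith t ",")).getD false) = true) := by
    rw [List.getLast?_map]
    cases hch : CH.getLast? with
    | none => rw [List.getLast?_eq_none_iff] at hch; exact absurd hch hCHne
    | some lastCH =>
      have hgl : CH.getLastD [] = lastCH := by simp [List.getLastD_eq_getLast?, hch]
      have h1 : (some (String.ofList lastCH) = some "") ↔ (CH.getLastD [] = []) := by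
        rw [hgl]
        constructor
        · intro h
          have h2 := congrArg String.toList (Option.some.inj h)
          simpa using h2
        · rintro rfl
          rfl
      rw [Option.map_some, h1, hCH, pv_trailing ctoks hne]
      constructor
      · rintro (hc | ⟨ct, hct, hcc⟩)
        · left
          rw [hctoks] at hc
          simpa using hc
        · right
          rw [hctoks, List.getLast?_map] at hct
          cases hlt : toks.getLast? with
          | none => rw [hlt] at hct; simp at hct
          | some t =>
            rw [hlt] at hct
            rw [Option.map_some] at hct
            have hteq : t.toList = ct := Option.some.inj hct
            have htm : t ∈ toks := List.mem_of_getLast? hlt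
            have htn : t.toList ≠ [] := (Htoks t htm).1
            rw [Option.map_some, Option.getD_some, pv_endswith_comma]
            rw [hteq]
            cases hctl : ct.getLast? with
            | none =>
              rw [List.getLast?_eq_none_iff] at hctl
              rw [hteq] at htn
              exact absurd hctl htn
            | some c =>
              rw [List.getLastD_eq_getLast?, hctl, Option.getD_some] at hcc
              rw [hcc]
      · rintro (hc | hB)
        · left
          rw [hctoks, hc]
          rfl
        · right
          cases hlt : toks.getLast? with
          | none => rw [hlt] at hB; simp at hB
          | some t =>
            rw [hlt, Option.map_some, Option.getD_some, pv_endswith_comma] at hB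
            refine ⟨t.toList, ?_, ?_⟩
            · rw [hctoks, List.getLast?_map, hlt, Option.map_some]
            · rw [List.getLastD_eq_getLast?, hB, Option.getD_some]
  -- final assembly: trim and fold
  have hsplit0map : (CH.map String.ofList).map PySem.Str.split₀ =
      Q.map (fun ws => ws.map String.ofList) := by
    rw [List.map_map, hQ, List.map_map]
    apply List.map_congr_left
    intro w _
    simp only [Function.comp_apply, PySem.Str.split₀]
    rw [show (String.ofList w).toList = w from by simp, pv_split0_eq]
  dsimp only
  rw [hparts, hBparts]
  by_cases hA : (CH.map String.ofList).getLast? = some ""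
  · rw [if_pos hA, if_pos (hcond.mp hA)]
    rw [pv_foldAB, List.map_dropLast, hsplit0map]
  · rw [if_neg hA, if_neg (fun hx => hA (hcond.mpr hx))]
    rw [pv_foldAB, hsplit0map]
-- ===== VERDICT (by name: the statement is the Claim_ definition above) =====
theorem extract_slot_from_string_spec : Claim_equal_extract_slot_from_string := by
  intro s _
  unfold Spec_extract_slot_from_string
  cases s with
  | none => rfl
  | some s =>
    have H0 : ∀ t ∈ PySem.Str.split₀ s,
        t.toList ≠ [] ∧ ∀ c ∈ t.toList, PySem.Chars.isspace c = false := by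
      intro t ht
      rw [PySem.Str.split₀, pv_split0_eq] at ht
      rcases List.mem_map.mp ht with ⟨w, hw, rfl⟩
      unfold pvWords at hw
      rw [List.mem_filter] at hw
      have hw1 : w ≠ [] := by simpa using hw.2
      have hw2 := fun c hc => (pv_chunks_flat PySem.Chars.isspace s.toList w hw.1 c hc).2
      have hwt : (String.ofList w).toList = w := by simp
      rw [hwt]
      exact ⟨hw1, hw2⟩
    have H1 : ∀ t ∈ (if PySem.Str.split₀ s ≠ [] ∧ (PySem.Str.split₀ s).headD "" ∈ ["<bs>", "</bs>"]
        then (PySem.Str.split₀ s).tail else PySem.Str.split₀ s),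
        t.toList ≠ [] ∧ ∀ c ∈ t.toList, PySem.Chars.isspace c = false := by
      intro t ht
      split_ifs at ht with hc
      · exact H0 t (List.mem_of_mem_tail ht)
      · exact H0 t ht
    unfold extract_slot_from_string extract_slot_from_string_alt
    dsimp only
    rw [pv_split0_strip]
    exact pv_core _ H1
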